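-- pv_equiv track=rewrite | github.com/skyoxu/lastking | scripts/sc/_pipeline_helpers.py | derive_pipeline_run_type
-- ===== SOURCE A (Python) =====
-- from typing import Any, Callable
--
-- _DETERMINISTIC_STEP_NAMES = {
--     "sc-build-tdd-refactor-preflight",
--     "sc-test",
--     "sc-acceptance-check",
-- }
--
-- def derive_pipeline_run_type(summary_payload: dict[str, Any]) -> str:
--     steps = summary_payload.get("steps") if isinstance(summary_payload.get("steps"), list) else []
--     if not steps:
--         return "full"
--     materialized_names: set[str] = set()
--     for step in steps:
--         if not isinstance(step, dict):
--             continue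
--         status = str(step.get("status") or "").strip().lower()
--         if not status or status == "planned":
--             continue
--         name = str(step.get("name") or "").strip()
--         if name:
--             materialized_names.add(name)
--
--     if not materialized_names:
--         return "planned-only"
--     if materialized_names == {"sc-build-tdd-refactor-preflight"}:
--         return "preflight-only"
--
--     has_llm = "sc-llm-review" in materialized_names
--     has_deterministic = bool(materialized_names.intersection(_DETERMINISTIC_STEP_NAMES))
--     if has_llm and not has_deterministic:
--         return "llm-only"
--     if has_deterministic and not has_llm:
--         return "deterministic-only"
--     return "full"
-- ===== SOURCE B (Python) =====
-- from typing import Any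
--
-- _DETERMINISTIC_STEP_NAMES = {
--     "sc-build-tdd-refactor-preflight",
--     "sc-test",
--     "sc-acceptance-check",
-- }
--
-- _PREFLIGHT = "sc-build-tdd-refactor-preflight"
--
--
-- def _materialized_name(step):
--     """Return the materialized step name, or None if the step is skipped."""
--     if not isinstance(step, dict):
--         return None
--     status = str(step.get("status") or "").strip().lower()
--     if not status or status == "planned":
--         return None
--     name = str(step.get("name") or "").strip()
--     return name or None
--
--
-- def derive_pipeline_run_type(summary_payload: dict[str, Any]) -> str:
--     steps = summary_payload.get("steps") if isinstance(summary_payload.get("steps"), list) else []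
--     if not steps:
--         return "full"
--     # staged short-circuit scans over the steps; no set and no accumulator loop
--     if all(_materialized_name(s) is None for s in steps):
--         return "planned-only"
--     if any(_materialized_name(s) == _PREFLIGHT for s in steps) and \
--        all(_materialized_name(s) in (None, _PREFLIGHT) for s in steps):
--         return "preflight-only"
--     has_llm = any(_materialized_name(s) == "sc-llm-review" for s in steps)
--     has_deterministic = any(_materialized_name(s) in _DETERMINISTIC_STEP_NAMES for s in steps)
--     if has_llm != has_deterministic:
--         return "llm-only" if has_llm else "deterministic-only"
--     return "full"
-- ===== Notes on version B (the rewrite author's own statement) =====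
-- stated objective: simpler
-- what changed: B never builds the materialized-names set or any loop accumulator: it classifies by staged short-circuiting any()/all() scans directly over the steps (all-planned, preflight-and-nothing-else, llm seen, deterministic seen) and reads the answer off those predicates.
import Mathlib
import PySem

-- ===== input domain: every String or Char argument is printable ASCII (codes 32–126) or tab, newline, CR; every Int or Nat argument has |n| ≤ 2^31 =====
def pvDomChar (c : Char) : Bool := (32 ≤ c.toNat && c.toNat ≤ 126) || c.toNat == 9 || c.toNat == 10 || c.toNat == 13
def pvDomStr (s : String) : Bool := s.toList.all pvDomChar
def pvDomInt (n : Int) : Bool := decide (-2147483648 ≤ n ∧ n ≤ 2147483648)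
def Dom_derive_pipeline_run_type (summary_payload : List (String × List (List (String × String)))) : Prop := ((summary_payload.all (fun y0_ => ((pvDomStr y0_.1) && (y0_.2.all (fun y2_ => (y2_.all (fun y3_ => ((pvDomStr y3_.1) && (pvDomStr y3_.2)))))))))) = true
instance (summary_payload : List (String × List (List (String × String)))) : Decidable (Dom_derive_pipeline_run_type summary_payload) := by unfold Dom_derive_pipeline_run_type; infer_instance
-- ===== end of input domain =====

-- B drops A's materialized-names set entirely: it classifies by staged short-circuiting
-- any()/all() scans directly over the steps; objective: simpler.

-- ===== PORT A =====
-- _DETERMINISTIC_STEP_NAMES (a module-level set literal)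
def pvDetNames : PySem.Set String :=
  PySem.Set.ofList ["sc-build-tdd-refactor-preflight", "sc-test", "sc-acceptance-check"]

def derive_pipeline_run_type (summary_payload : List (String × List (List (String × String)))) : String :=
  -- steps = summary_payload.get("steps") if isinstance(..., list) else []  (typed: any present value is a list)
  let steps := (PySem.Dict.mk summary_payload).getD "steps" []
  if steps.isEmpty then "full"
  else
    let materialized_names : PySem.Set String :=
      steps.foldl (fun acc step =>
        -- isinstance(step, dict) is always true under the typing
        let status := PySem.Str.lower (PySem.Str.strip ((PySem.Dict.mk step).getD "status" ""))
        if status = "" ∨ status = "planned" then acc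
        else
          let name := PySem.Str.strip ((PySem.Dict.mk step).getD "name" "")
          if name = "" then acc else PySem.Set.add acc name) PySem.Set.empty
    if materialized_names.isEmpty then "planned-only"
    else if PySem.Set.equal materialized_names
              (PySem.Set.ofList ["sc-build-tdd-refactor-preflight"]) then "preflight-only"
    else
      let has_llm := PySem.Set.contains materialized_names "sc-llm-review"
      let has_det := !(PySem.Set.inter materialized_names pvDetNames).isEmpty
      if has_llm && !has_det then "llm-only"
      else if has_det && !has_llm then "deterministic-only"
      else "full"

-- ===== PORT B =====
-- _materialized_name(step): the materialized step name, or none if the step is skipped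
def pvMatName? (step : List (String × String)) : Option String :=
  let status := PySem.Str.lower (PySem.Str.strip ((PySem.Dict.mk step).getD "status" ""))
  if status = "" ∨ status = "planned" then none
  else
    let name := PySem.Str.strip ((PySem.Dict.mk step).getD "name" "")
    if name = "" then none else some name

def pvDetList : List String := ["sc-build-tdd-refactor-preflight", "sc-test", "sc-acceptance-check"]
def pvPreflight : String := "sc-build-tdd-refactor-preflight"

def derive_pipeline_run_type_alt (summary_payload : List (String × List (List (String × String)))) : String :=
  let steps := (PySem.Dict.mk summary_payload).getD "steps" []
  if steps.isEmpty then "full"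
  else if steps.all (fun s => (pvMatName? s).isNone) then "planned-only"
  else if (steps.any (fun s => pvMatName? s == some pvPreflight))
          && steps.all (fun s => pvMatName? s == none || pvMatName? s == some pvPreflight) then
    "preflight-only"
  else
    let has_llm := steps.any (fun s => pvMatName? s == some "sc-llm-review")
    let has_det := steps.any (fun s => match pvMatName? s with
                                       | some n => pvDetList.contains n
                                       | none => false)
    if has_llm != has_det then (if has_llm then "llm-only" else "deterministic-only")
    else "full"

-- ===== PRECONDITION & SPEC =====
def Spec_derive_pipeline_run_type (summary_payload : List (String × List (List (String × String)))) (out : String) : Prop := out = derive_pipeline_run_type_alt summary_payload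
instance (summary_payload : List (String × List (List (String × String)))) (out : String) : Decidable (Spec_derive_pipeline_run_type summary_payload out) := by unfold Spec_derive_pipeline_run_type; infer_instance

-- ===== CLAIM =====
def Claim_equal_derive_pipeline_run_type : Prop := ∀ (summary_payload : List (String × List (List (String × String)))), Dom_derive_pipeline_run_type summary_payload → Spec_derive_pipeline_run_type summary_payload (derive_pipeline_run_type summary_payload)

-- ===== LEMMAS AND PROOFS =====

-- abbreviation for A's fold body (proof-side only)
def pvFoldF : PySem.Set String → List (String × String) → PySem.Set String :=
  fun acc step =>
    let status := PySem.Str.lower (PySem.Str.strip ((PySem.Dict.mk step).getD "status" ""))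
    if status = "" ∨ status = "planned" then acc
    else
      let name := PySem.Str.strip ((PySem.Dict.mk step).getD "name" "")
      if name = "" then acc else PySem.Set.add acc name

-- A's loop body, phrased through B's helper
lemma pvFoldF_none (step : List (String × String)) (acc : PySem.Set String)
    (h : pvMatName? step = none) : pvFoldF acc step = acc := by
  simp only [pvMatName?] at h
  simp only [pvFoldF]
  split_ifs at h ⊢ <;> simp_all

lemma pvFoldF_some (step : List (String × String)) (acc : PySem.Set String) (n : String)
    (h : pvMatName? step = some n) : pvFoldF acc step = PySem.Set.add acc n := by
  simp only [pvMatName?] at h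
  simp only [pvFoldF]
  split_ifs at h ⊢ <;> simp_all

lemma contains_add (s : PySem.Set String) (x y : String) :
    (PySem.Set.add s x).contains y = (s.contains y || x == y) := by
  simp only [PySem.Set.add, PySem.Set.contains]
  split_ifs with h
  · by_cases hxy : x = y
    · subst hxy; simp_all
    · simp [hxy]
  · by_cases hxy : x = y
    · subst hxy; simp
    · simp [hxy, Ne.symm hxy]

lemma any_add (s : PySem.Set String) (x : String) (p : String → Bool) :
    (PySem.Set.add s x).any p = (s.any p || p x) := by
  simp only [PySem.Set.add]
  split_ifs with h
  · by_cases hp : p x = true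
    · have hx : x ∈ s := by simpa [PySem.Set.contains, List.contains_iff_mem] using h
      have : s.any p = true := List.any_eq_true.mpr ⟨x, hx, hp⟩
      simp [this, hp]
    · simp [Bool.eq_false_iff.mpr hp]
  · simp [List.any_append]

lemma add_ne_empty (s : PySem.Set String) (x : String) :
    (PySem.Set.add s x).isEmpty = false := by
  simp only [PySem.Set.add]
  split_ifs with h
  · cases s with
    | nil => simp [PySem.Set.contains] at h
    | cons a t => simp
  · simp

-- the result of A's fold, read through B's scans
lemma fold_isEmpty (steps : List (List (String × String))) :
    ∀ s : PySem.Set String,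
      (steps.foldl pvFoldF s).isEmpty
        = (s.isEmpty && steps.all (fun st => (pvMatName? st).isNone)) := by
  induction steps with
  | nil => intro s; simp
  | cons st rest ih =>
    intro s
    simp only [List.foldl_cons, List.all_cons]
    cases hm : pvMatName? st with
    | none => rw [pvFoldF_none st s hm, ih]; simp [hm]
    | some n => rw [pvFoldF_some st s n hm, ih]; simp [hm, add_ne_empty]

lemma fold_any (steps : List (List (String × String))) (p : String → Bool) :
    ∀ s : PySem.Set String,
      (steps.foldl pvFoldF s).any p
        = (s.any p || steps.any (fun st => match pvMatName? st with
                                           | some n => p n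
                                           | none => false)) := by
  induction steps with
  | nil => intro s; simp
  | cons st rest ih =>
    intro s
    simp only [List.foldl_cons, List.any_cons]
    cases hm : pvMatName? st with
    | none => rw [pvFoldF_none st s hm, ih]; simp [hm]
    | some n =>
      rw [pvFoldF_some st s n hm, ih, any_add]
      simp only [hm]
      cases s.any p <;> cases p n <;> simp

lemma fold_contains (steps : List (List (String × String))) (x : String) :
    ∀ s : PySem.Set String,
      (steps.foldl pvFoldF s).contains x
        = (s.contains x || steps.any (fun st => pvMatName? st == some x)) := by
  induction steps with
  | nil => intro s; simp
  | cons st rest ih =>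
    intro s
    simp only [List.foldl_cons, List.any_cons]
    cases hm : pvMatName? st with
    | none =>
      rw [pvFoldF_none st s hm, ih]
      simp
    | some n =>
      rw [pvFoldF_some st s n hm, ih, contains_add]
      by_cases hx : n = x
      · subst hx; cases s.contains n <;> simp
      · cases s.contains x <;> simp [hx]

-- A's singleton equality test, as contains/any
lemma equal_singleton (m : PySem.Set String) :
    PySem.Set.equal m (PySem.Set.ofList ["sc-build-tdd-refactor-preflight"])
      = (m.contains "sc-build-tdd-refactor-preflight"
          && !(m.any (fun n => n != "sc-build-tdd-refactor-preflight"))) := by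
  show (m.all (fun x => (["sc-build-tdd-refactor-preflight"] : List String).contains x)
        && (["sc-build-tdd-refactor-preflight"] : List String).all (fun x => m.contains x)) = _
  have hfun : (fun x => !(List.contains (["sc-build-tdd-refactor-preflight"] : List String) x))
      = (fun n => n != "sc-build-tdd-refactor-preflight") := by
    funext x
    by_cases h : x = "sc-build-tdd-refactor-preflight" <;> simp [h]
  rw [List.all_eq_not_any_not, hfun]
  simp only [List.all_cons, List.all_nil, Bool.and_true, PySem.Set.contains]
  rw [Bool.and_comm]

lemma not_isEmpty_filter {α : Type} (p : α → Bool) (m : List α) :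
    (!(m.filter p).isEmpty) = m.any p := by
  induction m with
  | nil => rfl
  | cons a t ih => cases h : p a <;> simp [h, ih]

-- A's intersection-nonempty test, as any
lemma inter_det (m : PySem.Set String) :
    (!(PySem.Set.inter m pvDetNames).isEmpty)
      = m.any (fun n => pvDetList.contains n) := by
  show (!(List.filter (fun x => PySem.Set.contains pvDetNames x) m).isEmpty) = _
  rw [show pvDetNames = pvDetList from rfl]
  exact not_isEmpty_filter _ m

-- the final decision chains agree, as a pure boolean table
lemma classify_bool (a p q l d : Bool) :
    (if a then "planned-only"
     else if p && !q then "preflight-only"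
     else if l && !d then "llm-only"
     else if d && !l then "deterministic-only"
     else "full")
    = (if a then "planned-only"
       else if p && !q then "preflight-only"
       else if l != d then (if l then "llm-only" else "deterministic-only")
       else "full") := by
  cases a <;> cases p <;> cases q <;> cases l <;> cases d <;> rfl

-- the two post-loop classifications agree on a nonempty steps list
lemma tails_eq (steps : List (List (String × String))) :
    (let m := steps.foldl pvFoldF PySem.Set.empty
     if m.isEmpty then "planned-only"
     else if PySem.Set.equal m (PySem.Set.ofList ["sc-build-tdd-refactor-preflight"]) then "preflight-only"
     else
       let has_llm := PySem.Set.contains m "sc-llm-review"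
       let has_det := !(PySem.Set.inter m pvDetNames).isEmpty
       if has_llm && !has_det then "llm-only"
       else if has_det && !has_llm then "deterministic-only"
       else "full")
    = (if steps.all (fun s => (pvMatName? s).isNone) then "planned-only"
       else if (steps.any (fun s => pvMatName? s == some pvPreflight))
               && steps.all (fun s => pvMatName? s == none || pvMatName? s == some pvPreflight) then
         "preflight-only"
       else
         let has_llm := steps.any (fun s => pvMatName? s == some "sc-llm-review")
         let has_det := steps.any (fun s => match pvMatName? s with
                                            | some n => pvDetList.contains n
                                            | none => false)
         if has_llm != has_det then (if has_llm then "llm-only" else "deterministic-only")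
         else "full") := by
  have hE : (steps.foldl pvFoldF PySem.Set.empty).isEmpty
      = steps.all (fun st => (pvMatName? st).isNone) := by
    rw [fold_isEmpty]; rfl
  have hC1 : (steps.foldl pvFoldF PySem.Set.empty).contains "sc-build-tdd-refactor-preflight"
      = steps.any (fun s => pvMatName? s == some pvPreflight) := by
    rw [fold_contains]; rfl
  have hC2 : (steps.foldl pvFoldF PySem.Set.empty).contains "sc-llm-review"
      = steps.any (fun s => pvMatName? s == some "sc-llm-review") := by
    rw [fold_contains]; rfl
  have hA1 : (steps.foldl pvFoldF PySem.Set.empty).any (fun n => n != "sc-build-tdd-refactor-preflight")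
      = steps.any (fun st => match pvMatName? st with
                             | some n => n != "sc-build-tdd-refactor-preflight"
                             | none => false) := by
    rw [fold_any]; rfl
  have hA2 : (steps.foldl pvFoldF PySem.Set.empty).any (fun n => pvDetList.contains n)
      = steps.any (fun s => match pvMatName? s with
                            | some n => pvDetList.contains n
                            | none => false) := by
    rw [fold_any]; rfl
  have hAll : steps.all (fun s => pvMatName? s == none || pvMatName? s == some pvPreflight)
      = !(steps.any (fun st => match pvMatName? st with
                               | some n => n != "sc-build-tdd-refactor-preflight"
                               | none => false)) := by
    have hpt : (fun s => !(match pvMatName? s with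
                           | some n => n != "sc-build-tdd-refactor-preflight"
                           | none => false))
        = (fun s => pvMatName? s == none || pvMatName? s == some pvPreflight) := by
      funext s
      cases h : pvMatName? s with
      | none => simp [pvPreflight]
      | some n => by_cases hn : n = "sc-build-tdd-refactor-preflight" <;> simp [h, hn, pvPreflight, bne]
    rw [← hpt, List.all_eq_not_any_not]
    simp
  simp only [equal_singleton, inter_det]
  rw [hE, hC1, hC2, hA1, hA2, hAll]
  exact classify_bool _ _ _ _ _

-- ===== VERDICT =====
theorem derive_pipeline_run_type_spec : Claim_equal_derive_pipeline_run_type := by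
  intro summary_payload _
  unfold Spec_derive_pipeline_run_type derive_pipeline_run_type derive_pipeline_run_type_alt
  by_cases he : ((PySem.Dict.mk summary_payload).getD "steps" []).isEmpty
  · simp only [he, if_true]
  · simp only [he, Bool.false_eq_true, if_false]
    exact tails_eq ((PySem.Dict.mk summary_payload).getD "steps" [])
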